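-- pv_equiv track=rewrite | github.com/Veseha/FinalCatClient | PYTEST_STANDART/Veseha/Реализация strip_punctuation_ru().py | func
-- ===== SOURCE A (Python) =====
-- def func(s):
--     a = '''!()[]{};:'"\,<>./?@#$%^&*_~'''
--     strr = ""
--     for char in s:
--         if char in a:
--             strr += ' '
--         else:
--             strr += char
--     return strr
-- ===== SOURCE B (Python) =====
-- def func(s):
--     a = '''!()[]{};:'"\,<>./?@#$%^&*_~'''
--     for c in a:
--         s = s.replace(c, ' ')
--     return s
-- ===== Notes on version B (the rewrite author's own statement) =====
-- stated objective: faster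
-- what changed: Instead of one Python-level pass over the string with a per-character membership test and a string-concatenation accumulator, B loops over the 27 punctuation characters and applies a whole-string str.replace once per character (staged passes in C); correct since the space character substituted in is not itself punctuation.
import Mathlib
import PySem

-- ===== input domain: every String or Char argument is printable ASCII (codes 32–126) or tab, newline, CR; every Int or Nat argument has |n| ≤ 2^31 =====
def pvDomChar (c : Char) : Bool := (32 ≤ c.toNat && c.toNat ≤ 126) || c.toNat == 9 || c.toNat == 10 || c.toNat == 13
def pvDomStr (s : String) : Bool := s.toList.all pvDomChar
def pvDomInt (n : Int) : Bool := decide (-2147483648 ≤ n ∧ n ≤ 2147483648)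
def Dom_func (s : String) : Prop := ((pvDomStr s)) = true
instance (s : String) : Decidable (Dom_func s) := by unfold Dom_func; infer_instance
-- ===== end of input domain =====

-- B replaces A's single per-character loop (membership test + accumulator) by one
-- whole-string str.replace pass per punctuation character; objective: faster (constant-factor: C-level passes).

-- ===== PORT A =====
def func (s : String) : String :=
  let a : String := "!()[]{};:'\"\\,<>./?@#$%^&*_~"
  s.toList.foldl (fun strr char => if a.toList.contains char then strr ++ " " else strr.push char) ""

-- ===== PORT B =====
-- for c in a: s = s.replace(c, ' ')
def func_alt (s : String) : String :=
  let a : String := "!()[]{};:'\"\\,<>./?@#$%^&*_~"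
  a.toList.foldl (fun s c => PySem.Str.replace s (String.ofList [c]) " ") s

-- ===== PRECONDITION & SPEC =====
def Spec_func (s : String) (out : String) : Prop := out = func_alt s
instance (s : String) (out : String) : Decidable (Spec_func s out) := by unfold Spec_func; infer_instance

-- ===== CLAIM (what is proved, stated in full; the proofs are below) =====
def Claim_equal_func : Prop := ∀ (s : String), Dom_func s → Spec_func s (func s)

-- ===== LEMMAS AND PROOFS =====

-- replace.go for a single-char pattern and single-char replacement is a map
theorem replace_go_single (p r : Char) :
    ∀ (l : List Char) (fuel : Nat) (acc : List Char), l.length ≤ fuel →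
      PySem.Chars.replace.go [p] [r] fuel l acc
        = acc.reverse ++ l.map (fun x => if x = p then r else x) := by
  intro l
  induction l with
  | nil =>
    intro fuel acc _
    cases fuel <;> simp [PySem.Chars.replace.go]
  | cons c t ih =>
    intro fuel acc hle
    cases fuel with
    | zero => simp at hle
    | succ n =>
      rw [PySem.Chars.replace.go]
      by_cases hc : c = p
      · subst hc
        have hpre : [c].isPrefixOf (c :: t) = true := by simp [List.isPrefixOf]
        simp only [hpre, if_pos, List.length_cons, List.length_nil, Nat.zero_add,
          List.drop_succ_cons, List.drop_zero, List.reverse_singleton, List.singleton_append]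
        rw [ih n (r :: acc) (by simpa using Nat.lt_succ_iff.mp (by simpa using hle))]
        simp
      · have hpre : [p].isPrefixOf (c :: t) = false := by
          simp [List.isPrefixOf]
          exact fun h => absurd h.symm hc
        simp only [hpre, Bool.false_eq_true, if_false]
        rw [ih n (c :: acc) (by simpa using Nat.lt_succ_iff.mp (by simpa using hle))]
        simp [hc]

theorem replace_single (p r : Char) (l : List Char) :
    PySem.Chars.replace l [p] [r] = l.map (fun x => if x = p then r else x) := by
  rw [PySem.Chars.replace]
  simp only [List.isEmpty_cons, Bool.false_eq_true, if_false]
  simpa using replace_go_single p r l l.length [] le_rfl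

-- folding single-char replacements over a list of patterns, none of which equals the
-- replacement character, is one map with a membership test
theorem fold_replace_maps (r : Char) :
    ∀ (ps : List Char), r ∉ ps → ∀ (l : List Char),
      ps.foldl (fun l p => l.map (fun x => if x = p then r else x)) l
        = l.map (fun x => if x ∈ ps then r else x) := by
  intro ps
  induction ps with
  | nil => intro _ l; simp
  | cons p t ih =>
    intro hr l
    have hrt : r ∉ t := fun h => hr (List.mem_cons_of_mem _ h)
    have hrp : r ≠ p := fun h => hr (h ▸ List.mem_cons_self ..)
    rw [List.foldl_cons, ih hrt, List.map_map]
    apply List.map_congr_left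
    intro x _
    by_cases hx : x = p
    · subst hx; simp [hrt]
    · simp only [Function.comp_apply, hx, if_false, List.mem_cons]
      by_cases hxt : x ∈ t <;> simp [hxt]

-- A's accumulator loop is the same map
theorem func_loop (a : List Char) :
    ∀ (l : List Char) (acc : String),
      l.foldl (fun strr char => if a.contains char then strr ++ " " else strr.push char) acc
        = acc ++ String.ofList (l.map (fun x => if x ∈ a then ' ' else x)) := by
  intro l
  induction l with
  | nil => intro acc; apply String.toList_inj.mp; simp
  | cons c t ih =>
    intro acc
    rw [List.foldl_cons, ih]
    by_cases hc : c ∈ a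
    · simp only [List.contains_eq_mem, hc, decide_true, if_pos]
      apply String.toList_inj.mp; simp [hc]
    · simp only [List.contains_eq_mem, hc, decide_false, Bool.false_eq_true, if_false]
      apply String.toList_inj.mp; simp [hc]

-- ===== VERDICT (by name: the statement is the Claim_ definition above) =====
theorem func_spec : Claim_equal_func := by
  intro s _
  unfold Spec_func func func_alt
  simp only
  rw [func_loop]
  have hb : ∀ (ps : List Char), (' ' : Char) ∉ ps → ∀ (t : String),
      ps.foldl (fun s c => PySem.Str.replace s (String.ofList [c]) " ") t
        = String.ofList (t.toList.map (fun x => if x ∈ ps then ' ' else x)) := by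
    intro ps hps t
    have := fold_replace_maps ' ' ps hps t.toList
    rw [← this]
    clear this
    induction ps generalizing t with
    | nil => simp
    | cons p q ih =>
      rw [List.foldl_cons, List.foldl_cons, ih (fun h => hps (List.mem_cons_of_mem _ h))]
      congr 1
      rw [PySem.Str.replace]
      simp [replace_single]
  rw [hb _ (by decide)]
  apply String.toList_inj.mp
  simp
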